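-- pv_equiv track=rewrite | github.com/liushiliushi/JitRL | Jericho/src/utils.py | find_environment_info_fallback
-- ===== SOURCE A (Python) =====
-- def find_environment_info_fallback(states, current_step, max_search_steps=10):
--     """
--     Fallback method when LLM call fails, finds environment info through simple matching.
--     Only considers the most recent max_search_steps states for environment information.
--
--     Args:
--         states: List of all states in the episode
--         current_step: Current step index
--         max_search_steps: Maximum number of recent steps to search (default: 10)
--
--     Returns:
--         str: Found environment information or original current_state
--     """
--     if not states or current_step < 0 or current_step >= len(states):
--         return ""
--
--     current_state = states[current_step]
--
--     # If current_state is already detailed (length > 50), return directly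
--     if len(current_state) > 50:
--         return current_state
--
--     # Limit search to most recent max_search_steps states
--     start_step = max(0, current_step - max_search_steps + 1)  # Include current step, so look at max_search_steps steps total
--
--     # Search for most recent detailed state description from recent history
--     for i in range(current_step, start_step - 1, -1):
--         state = states[i]
--         if len(state) > 50:  # Consider states with length > 50 as detailed
--             # Check if contains location-related information
--             location_keywords = ['room', 'hallway', 'corridor', 'chamber', 'area', 'space', 'place']
--             if any(keyword in state.lower() for keyword in location_keywords):
--                 return state
--
--     # If no suitable detailed description found, return last non-empty state from recent history
--     for i in range(current_step, start_step - 1, -1):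
--         state = states[i]
--         if state.strip():
--             return state
--
--     return current_state
-- ===== SOURCE B (Python) =====
-- def find_environment_info_fallback(states, current_step, max_search_steps=10):
--     if not states or current_step < 0 or current_step >= len(states):
--         return ""
--     current_state = states[current_step]
--     if len(current_state) > 50:
--         return current_state
--     start_step = max(0, current_step - max_search_steps + 1)
--     location_keywords = ('room', 'hallway', 'corridor', 'chamber', 'area', 'space', 'place')
--     fallback = None
--     for i in range(current_step, start_step - 1, -1):
--         state = states[i]
--         if len(state) > 50 and any(k in state.lower() for k in location_keywords):
--             return state
--         if fallback is None and state.strip():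
--             fallback = state
--     return fallback if fallback is not None else current_state
-- ===== Notes on version B (the rewrite author's own statement) =====
-- stated objective: simpler
-- what changed: Replaces A's two separate backward scans (one for a detailed keyword state, then a second full rescan for the most recent non-empty state) by a single backward pass that returns a detailed keyword state immediately and records the first non-empty state once as a fallback.
import Mathlib
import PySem

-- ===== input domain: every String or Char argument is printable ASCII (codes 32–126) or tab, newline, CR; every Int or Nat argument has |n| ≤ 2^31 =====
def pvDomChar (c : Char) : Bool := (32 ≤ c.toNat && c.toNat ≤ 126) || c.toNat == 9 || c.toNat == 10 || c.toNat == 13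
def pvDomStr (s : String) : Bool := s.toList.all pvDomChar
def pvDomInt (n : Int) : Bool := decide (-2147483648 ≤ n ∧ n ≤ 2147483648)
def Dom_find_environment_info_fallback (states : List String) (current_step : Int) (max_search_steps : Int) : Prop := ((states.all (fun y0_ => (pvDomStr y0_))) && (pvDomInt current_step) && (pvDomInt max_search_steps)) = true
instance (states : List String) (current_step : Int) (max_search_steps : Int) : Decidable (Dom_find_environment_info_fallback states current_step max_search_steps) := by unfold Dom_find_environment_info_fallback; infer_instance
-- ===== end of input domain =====

-- B merges A's two backward scans into one backward pass that returns a detailed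
-- keyword state immediately and records the most recent non-empty state once as a
-- fallback (objective: simpler). Return-value equivalence is proved on all inputs.

-- ===== PORT A =====
def locKeywords : List String := ["room", "hallway", "corridor", "chamber", "area", "space", "place"]

-- body of A's first loop: a detailed state containing a location keyword, or none
def aProbe1 (states : List String) (i : Int) : Option String :=
  let state := (PySem.List.pyGet? states i).getD ""
  if 50 < PySem.Str.len state then
    if locKeywords.any (fun k => PySem.Str.isIn k (PySem.Str.lower state)) then some state
    else none
  else none

-- body of A's second loop: the state if non-empty after strip, or none
def aProbe2 (states : List String) (i : Int) : Option String :=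
  let state := (PySem.List.pyGet? states i).getD ""
  if PySem.Str.strip state ≠ "" then some state else none

def find_environment_info_fallback (states : List String) (current_step : Int) (max_search_steps : Int) : String :=
  if states = [] ∨ current_step < 0 ∨ current_step ≥ (states.length : Int) then ""
  else
    let current_state := (PySem.List.pyGet? states current_step).getD ""
    if 50 < PySem.Str.len current_state then current_state
    else
      let start_step := max 0 (current_step - max_search_steps + 1)
      let idxs := PySem.List.pyRange current_step (start_step - 1) (-1)
      -- first loop: most recent detailed state containing a location keyword
      match idxs.findSome? (aProbe1 states) with
      | some s => s
      | none =>
        -- second loop: most recent non-empty (after strip) state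
        match idxs.findSome? (aProbe2 states) with
        | some s => s
        | none => current_state

-- ===== PORT B =====
-- single backward pass: immediate return on a detailed keyword state, fallback recorded once
def altLoop (states : List String) (cs : String) (fb : Option String) : List Int → String
  | [] => fb.getD cs
  | i :: rest =>
    let state := (PySem.List.pyGet? states i).getD ""
    if 50 < PySem.Str.len state ∧ locKeywords.any (fun k => PySem.Str.isIn k (PySem.Str.lower state)) then
      state
    else
      altLoop states cs (if fb = none ∧ PySem.Str.strip state ≠ "" then some state else fb) rest

def find_environment_info_fallback_alt (states : List String) (current_step : Int) (max_search_steps : Int) : String :=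
  if states = [] ∨ current_step < 0 ∨ current_step ≥ (states.length : Int) then ""
  else
    let current_state := (PySem.List.pyGet? states current_step).getD ""
    if 50 < PySem.Str.len current_state then current_state
    else
      altLoop states current_state none
        (PySem.List.pyRange current_step (max 0 (current_step - max_search_steps + 1) - 1) (-1))

-- ===== PRECONDITION & SPEC =====
def Spec_find_environment_info_fallback (states : List String) (current_step : Int) (max_search_steps : Int) (out : String) : Prop := out = find_environment_info_fallback_alt states current_step max_search_steps
instance (states : List String) (current_step : Int) (max_search_steps : Int) (out : String) : Decidable (Spec_find_environment_info_fallback states current_step max_search_steps out) := by unfold Spec_find_environment_info_fallback; infer_instance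

-- ===== CLAIM (what is proved, stated in full; the proofs are below) =====
def Claim_equal_find_environment_info_fallback : Prop := ∀ (states : List String) (current_step : Int) (max_search_steps : Int), Dom_find_environment_info_fallback states current_step max_search_steps → Spec_find_environment_info_fallback states current_step max_search_steps (find_environment_info_fallback states current_step max_search_steps)

-- ===== LEMMAS AND PROOFS =====

-- B's single pass equals: first-loop result, else the pending fallback, else second-loop result, else cs.
theorem altLoop_eq (states : List String) (cs : String) (idxs : List Int) (fb : Option String) :
    altLoop states cs fb idxs =
      ((idxs.findSome? (aProbe1 states)).or
        (fb.or (idxs.findSome? (aProbe2 states)))).getD cs := by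
  induction idxs generalizing fb with
  | nil => simp [altLoop]
  | cons i rest ih =>
    simp only [altLoop]
    by_cases hc : 50 < PySem.Str.len ((PySem.List.pyGet? states i).getD "") ∧
        (locKeywords.any (fun k =>
          PySem.Str.isIn k (PySem.Str.lower ((PySem.List.pyGet? states i).getD "")))) = true
    · rw [if_pos hc]
      have e1 : aProbe1 states i = some ((PySem.List.pyGet? states i).getD "") := by
        unfold aProbe1; rw [if_pos hc.1, if_pos hc.2]
      simp [List.findSome?_cons, e1, Option.or]
    · rw [if_neg hc]
      have e1 : aProbe1 states i = none := by
        unfold aProbe1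
        by_cases ha : 50 < PySem.Str.len ((PySem.List.pyGet? states i).getD "")
        · rw [if_pos ha]
          by_cases hb : (locKeywords.any (fun k =>
              PySem.Str.isIn k (PySem.Str.lower ((PySem.List.pyGet? states i).getD "")))) = true
          · exact absurd ⟨ha, hb⟩ hc
          · rw [if_neg hb]
        · rw [if_neg ha]
      have e2 : (if fb = none ∧ PySem.Str.strip ((PySem.List.pyGet? states i).getD "") ≠ ""
            then some ((PySem.List.pyGet? states i).getD "") else fb)
          = fb.or (aProbe2 states i) := by
        unfold aProbe2
        cases fb <;>
          by_cases h3 : PySem.Str.strip ((PySem.List.pyGet? states i).getD "") ≠ "" <;>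
            simp [h3, Option.or]
      rw [e2, ih]
      cases hg2 : aProbe2 states i <;>
        simp [e1, hg2]

-- ===== VERDICT (by name: the statement is the Claim_ definition above) =====
theorem find_environment_info_fallback_spec : Claim_equal_find_environment_info_fallback := by
  intro states current_step max_search_steps _
  unfold Spec_find_environment_info_fallback
  simp only [find_environment_info_fallback, find_environment_info_fallback_alt]
  by_cases hg : states = [] ∨ current_step < 0 ∨ current_step ≥ (states.length : Int)
  · rw [if_pos hg, if_pos hg]
  · rw [if_neg hg, if_neg hg]
    by_cases hd : 50 < PySem.Str.len ((PySem.List.pyGet? states current_step).getD "")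
    · rw [if_pos hd, if_pos hd]
    · rw [if_neg hd, if_neg hd, altLoop_eq]
      cases hf1 : (PySem.List.pyRange current_step
            (max 0 (current_step - max_search_steps + 1) - 1) (-1)).findSome? (aProbe1 states) with
      | some s => simp [Option.or]
      | none =>
        cases hf2 : (PySem.List.pyRange current_step
              (max 0 (current_step - max_search_steps + 1) - 1) (-1)).findSome? (aProbe2 states) with
        | some s => simp [Option.or]
        | none => simp [Option.or]
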